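-- pv_equiv track=rewrite | github.com/firatbatar/projectEuler | Python/Problem79 - Passcode derivation.py | make_number_graph
-- ===== SOURCE A (Python) =====
-- def connections(attempt):
--     l = len(attempt)
--     for i in range(l - 1):
--         for j in range(i + 1, l):
--             yield attempt[i], attempt[j]
--
-- def make_number_graph(keylog):
--     graph = dict()
--     for attempt in keylog:
--         for a, b in connections(attempt):
--             if a not in graph:
--                 graph[a] = {b}
--             else:
--                 graph[a].add(b)
--     return graph
-- ===== SOURCE B (Python) =====
-- def make_number_graph(keylog):
--     graph = {}
--     for attempt in keylog:
--         # first-occurrence index of each distinct character, in order of appearance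
--         first = {}
--         for i, c in enumerate(attempt):
--             if c not in first:
--                 first[c] = i
--         n = len(attempt)
--         for c, i in first.items():
--             if i < n - 1:
--                 graph[c] = graph.get(c, set()) | set(attempt[i + 1:])
--     return graph
-- ===== Notes on version B (the rewrite author's own statement) =====
-- stated objective: alternative
-- what changed: A emits every ordered index pair of each attempt via a generator and inserts the pairs one by one with a membership branch; B instead builds a first-occurrence index table per attempt and performs one bulk set-union of the whole suffix after each distinct character's first occurrence, so repeated characters and the inner pair loop disappear.
import Mathlib
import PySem

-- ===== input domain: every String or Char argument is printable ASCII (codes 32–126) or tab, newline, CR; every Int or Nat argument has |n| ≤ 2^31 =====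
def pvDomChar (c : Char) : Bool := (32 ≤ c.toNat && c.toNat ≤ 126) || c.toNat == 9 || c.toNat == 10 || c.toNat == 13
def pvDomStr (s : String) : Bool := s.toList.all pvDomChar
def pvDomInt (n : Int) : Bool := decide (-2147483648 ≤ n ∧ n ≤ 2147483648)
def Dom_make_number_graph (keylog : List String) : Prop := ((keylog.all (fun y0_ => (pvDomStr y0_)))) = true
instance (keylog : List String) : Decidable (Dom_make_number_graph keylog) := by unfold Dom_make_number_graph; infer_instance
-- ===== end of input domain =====

-- B replaces A's quadratic pair-emitting generator by a first-occurrence index table with one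
-- bulk suffix-union per distinct character of each attempt (objective: alternative decomposition).

-- Python's attempt[i] is a 1-character string; both ports model it as a lookup into the
-- list of 1-character strings of the attempt.
def pyChar (c : Char) : String := String.ofList [c]

-- ===== PORT A =====
def connections (attempt : String) : List (String × String) :=
  let cs : List String := attempt.toList.map pyChar
  let l : Int := PySem.Str.len attempt
  (PySem.List.pyRange 0 (l - 1) 1).flatMap (fun i =>
    (PySem.List.pyRange (i + 1) l 1).map (fun j =>
      (PySem.List.pyGetD cs i "", PySem.List.pyGetD cs j "")))

def make_number_graph (keylog : List String) : List (String × List String) :=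
  (keylog.foldl (fun graph attempt =>
      (connections attempt).foldl (fun graph ab =>
        if graph.contains ab.1 = false then
          graph.insert ab.1 (PySem.Set.ofList [ab.2])          -- graph[a] = {b}
        else
          graph.modify ab.1 PySem.Set.empty (fun s => PySem.Set.add s ab.2))  -- graph[a].add(b)
        graph)
    PySem.Dict.empty).items

-- ===== PORT B =====
def make_number_graph_alt (keylog : List String) : List (String × List String) :=
  (keylog.foldl (fun graph attempt =>
      let first : PySem.Dict String Int :=
        (PySem.List.enumerate attempt.toList).foldl (fun f ic =>
          if f.contains (pyChar ic.2) = false then f.insert (pyChar ic.2) ic.1 else f)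
          PySem.Dict.empty
      let n : Int := PySem.Str.len attempt
      first.items.foldl (fun graph ci =>
        if ci.2 < n - 1 then
          graph.insert ci.1 (PySem.Set.union (graph.getD ci.1 PySem.Set.empty)
            (PySem.Set.ofList ((PySem.Str.slice attempt (some (ci.2 + 1)) none).toList.map pyChar)))
        else graph)
        graph)
    PySem.Dict.empty).items

-- ===== PRECONDITION & SPEC =====
def Spec_make_number_graph (keylog : List String) (out : List (String × List String)) : Prop := out = make_number_graph_alt keylog
instance (keylog : List String) (out : List (String × List String)) : Decidable (Spec_make_number_graph keylog out) := by unfold Spec_make_number_graph; infer_instance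

-- ===== CLAIM (what is proved, stated in full; the proofs are below) =====
def Claim_equal_make_number_graph : Prop := ∀ (keylog : List String), Dom_make_number_graph keylog → Spec_make_number_graph keylog (make_number_graph keylog)

-- ===== LEMMAS AND PROOFS =====

-- the characters of an attempt, as 1-character strings
def chars (s : String) : List String := s.toList.map pyChar

-- A's per-pair update
def stepA (g : PySem.Dict String (PySem.Set String)) (p : String × String) :
    PySem.Dict String (PySem.Set String) :=
  if g.contains p.1 = false then g.insert p.1 (PySem.Set.ofList [p.2])
  else g.modify p.1 PySem.Set.empty (fun s => PySem.Set.add s p.2)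

-- all ordered pairs (earlier char, later char) of a list
def pairsOf : List String → List (String × String)
  | [] => []
  | c :: rest => rest.map (fun b => (c, b)) ++ pairsOf rest

-- one bulk successor-set update (no-op on an empty suffix)
def bulk (g : PySem.Dict String (PySem.Set String)) (c : String) (rest : List String) :
    PySem.Dict String (PySem.Set String) :=
  if rest = [] then g else g.insert c (PySem.Set.update (g.getD c PySem.Set.empty) rest)

-- A's whole-attempt effect, occurrence by occurrence
def occFold : PySem.Dict String (PySem.Set String) → List String → PySem.Dict String (PySem.Set String)
  | g, [] => g
  | g, c :: rest => occFold (bulk g c rest) rest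

-- first-occurrence entries (char, suffix after it)
def fo : List String → List String → List (String × List String)
  | _, [] => []
  | seen, c :: rest => if c ∈ seen then fo seen rest else (c, rest) :: fo (c :: seen) rest

-- first-occurrence entries (char, index)
def foI : Int → List String → List String → List (String × Int)
  | _, _, [] => []
  | i, seen, c :: rest => if c ∈ seen then foI (i + 1) seen rest else (c, i) :: foI (i + 1) (c :: seen) rest

theorem stepA_eq (g : PySem.Dict String (PySem.Set String)) (p : String × String) :
    stepA g p = g.insert p.1 (PySem.Set.add (g.getD p.1 PySem.Set.empty) p.2) := by
  unfold stepA
  by_cases h : g.contains p.1 = false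
  · rw [if_pos h, PySem.Dict.getD_of_not_contains _ _ h]; rfl
  · rw [if_neg h]; rfl

theorem foldl_stepA_map_aux (c : String) (bs : List String) (g : PySem.Dict String (PySem.Set String))
    (s : PySem.Set String) :
    (bs.map (fun b => (c, b))).foldl stepA (g.insert c s) = g.insert c (PySem.Set.update s bs) := by
  induction bs generalizing s with
  | nil => rfl
  | cons b bs ih =>
    simp only [List.map_cons, List.foldl_cons, stepA_eq, PySem.Dict.getD_insert_self,
      PySem.Dict.insert_insert_self]
    exact ih (PySem.Set.add s b)

theorem foldl_stepA_map (c : String) (rest : List String) (g : PySem.Dict String (PySem.Set String)) :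
    (rest.map (fun b => (c, b))).foldl stepA g = bulk g c rest := by
  cases rest with
  | nil => simp [bulk]
  | cons b bs =>
    simp only [List.map_cons, List.foldl_cons, stepA_eq, bulk, reduceCtorEq, if_false]
    exact foldl_stepA_map_aux c bs g _

theorem foldl_stepA_pairsOf (cs : List String) (g : PySem.Dict String (PySem.Set String)) :
    (pairsOf cs).foldl stepA g = occFold g cs := by
  induction cs generalizing g with
  | nil => rfl
  | cons c rest ih =>
    simp only [pairsOf, List.foldl_append, occFold, foldl_stepA_map]
    exact ih _

theorem pairs_range (cs : List String) :
    (List.range (cs.length - 1)).flatMap (fun k =>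
      (cs.drop (k+1)).map (fun b => (cs.getD k "", b))) = pairsOf cs := by
  induction cs with
  | nil => rfl
  | cons c cs' ih =>
    cases cs' with
    | nil => simp [pairsOf]
    | cons d ds =>
      simp only [List.length_cons, Nat.add_sub_cancel] at ih ⊢
      rw [List.range_succ_eq_map, List.flatMap_cons, List.flatMap_map]
      show ((d :: ds).drop 0).map (fun b => ((c :: d :: ds).getD 0 "", b)) ++ _
          = (d :: ds).map (fun b => (c, b)) ++ pairsOf (d :: ds)
      rw [← ih]
      refine congrArg₂ (· ++ ·) rfl ?_
      refine List.flatMap_congr ?_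
      intro a _
      simp [List.drop_succ_cons]

theorem connections_eq (attempt : String) : connections attempt = pairsOf (chars attempt) := by
  unfold connections chars
  simp only [PySem.Str.len_eq]
  rw [PySem.List.pyRange_one, List.flatMap_map]
  have hlen : (attempt.toList.map pyChar).length = attempt.toList.length := List.length_map _
  have h1 : ((attempt.toList.length : Int) - 1 - 0).toNat = (attempt.toList.map pyChar).length - 1 := by
    rw [hlen]; omega
  rw [h1]
  rw [← pairs_range (attempt.toList.map pyChar)]
  refine List.flatMap_congr ?_
  intro k hk
  rw [List.mem_range] at hk
  have hz : (0 : Int) + (k : Int) = ((k : Nat) : Int) := by omega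
  rw [hz]
  have hcast : ((k : Nat) : Int) + 1 = (((k + 1 : Nat)) : Int) := by push_cast; ring
  rw [hcast]
  have hb : ((attempt.toList.length : Int)) = ((attempt.toList.map pyChar).length : Int) := by rw [hlen]
  rw [hb]
  have hm := PySem.List.map_pyGetD_pyRange' (attempt.toList.map pyChar) ""
    (a := ((k + 1 : Nat) : Int)) (by positivity)
  simp only [Int.toNat_natCast] at hm
  rw [← hm, List.map_map]
  simp [Function.comp, PySem.List.pyGetD_natCast]

theorem set_update_of_subset (s : PySem.Set String) (xs : List String)
    (h : ∀ x ∈ xs, x ∈ s) : PySem.Set.update s xs = s := by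
  rw [PySem.Set.update_eq_append_filter]
  have hf : (PySem.Set.ofList xs).filter (fun y => !(PySem.Set.contains s y)) = [] := by
    apply List.filter_eq_nil_iff.mpr
    intro y hy
    have hys : y ∈ s := h y ((PySem.Set.mem_ofList xs y).mp hy)
    simpa using hys
  rw [hf, List.append_nil]

theorem insert_getD_self (g : PySem.Dict String (PySem.Set String)) (c : String)
    (d0 : PySem.Set String) (hc : g.contains c = true) (hnd : g.keys.Nodup) :
    g.insert c (g.getD c d0) = g := by
  apply PySem.Dict.ext
  rw [PySem.Dict.items_insert_of_contains _ _ hc]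
  have hpt : ∀ p ∈ g.items, (fun p => if p.1 == c then (c, g.getD c d0) else p) p = p := by
    intro p hp
    by_cases h : p.1 = c
    · have hgv : g.getD p.1 d0 = p.2 := PySem.Dict.getD_of_mem_items g (by simpa using hp) hnd d0
      subst h
      simp [hgv]
    · simp [h]
  rw [List.map_congr_left hpt, List.map_id']

theorem bulk_keys_nodup (g : PySem.Dict String (PySem.Set String)) (c : String)
    (rest : List String) (hnd : g.keys.Nodup) : (bulk g c rest).keys.Nodup := by
  unfold bulk
  split
  · exact hnd
  · exact PySem.Dict.nodup_keys_insert _ _ _ hnd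

theorem core_absorb (cs : List String) : ∀ (seen : List String)
    (g : PySem.Dict String (PySem.Set String)), g.keys.Nodup →
    (∀ c ∈ seen, cs ≠ [] → g.contains c = true ∧ ∀ x ∈ cs, x ∈ g.getD c PySem.Set.empty) →
    occFold g cs = (fo seen cs).foldl (fun g p => bulk g p.1 p.2) g := by
  induction cs with
  | nil => intro seen g _ _; rfl
  | cons c rest ih =>
    intro seen g hnd hinv
    by_cases hc : c ∈ seen
    · have habs : bulk g c rest = g := by
        cases hrest : rest with
        | nil => rfl
        | cons d ds =>
          obtain ⟨hcont, hmem⟩ := hinv c hc (by simp)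
          unfold bulk
          rw [if_neg (by simp), set_update_of_subset _ _
            (fun x hx => hmem x (List.mem_cons_of_mem _ (hrest ▸ hx))), insert_getD_self _ _ _ hcont hnd]
      show occFold (bulk g c rest) rest = (fo seen (c :: rest)).foldl (fun g p => bulk g p.1 p.2) g
      rw [habs]
      unfold fo
      rw [if_pos hc]
      exact ih seen g hnd (fun c' hc' hne => by
        obtain ⟨h1, h2⟩ := hinv c' hc' (by simp)
        exact ⟨h1, fun x hx => h2 x (List.mem_cons_of_mem _ hx)⟩)
    · show occFold (bulk g c rest) rest = (fo seen (c :: rest)).foldl (fun g p => bulk g p.1 p.2) g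
      unfold fo
      rw [if_neg hc]
      show occFold (bulk g c rest) rest
        = (fo (c :: seen) rest).foldl (fun g p => bulk g p.1 p.2) (bulk g c rest)
      apply ih (c :: seen) (bulk g c rest) (bulk_keys_nodup _ _ _ hnd)
      intro c' hc' hne
      have hbulk : bulk g c rest = g.insert c (PySem.Set.update (g.getD c PySem.Set.empty) rest) := by
        unfold bulk; rw [if_neg hne]
      rcases List.mem_cons.mp hc' with h | h
      · subst h
        refine ⟨by rw [hbulk]; exact PySem.Dict.contains_insert_self _ _ _, ?_⟩
        intro x hx
        rw [hbulk, PySem.Dict.getD_insert_self]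
        exact (PySem.Set.mem_update _ _ _).mpr (Or.inr hx)
      · have hne' : c' ≠ c := fun he => hc (he ▸ h)
        obtain ⟨h1, h2⟩ := hinv c' h (by simp)
        refine ⟨?_, ?_⟩
        · rw [hbulk, PySem.Dict.contains_insert, h1]; simp
        · intro x hx
          rw [hbulk, PySem.Dict.getD_insert_of_ne _ _ _ hne']
          exact h2 x (List.mem_cons_of_mem _ hx)

theorem foI_congr (l : List String) : ∀ (i : Int) (s t : List String),
    (∀ x, x ∈ s ↔ x ∈ t) → foI i s l = foI i t l := by
  induction l with
  | nil => intro i s t h; rfl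
  | cons c rest ih =>
    intro i s t h
    unfold foI
    by_cases hc : c ∈ s
    · rw [if_pos hc, if_pos ((h c).mp hc)]
      exact ih _ s t h
    · rw [if_neg hc, if_neg (fun hx => hc ((h c).mpr hx))]
      refine congrArg _ (ih _ (c :: s) (c :: t) (fun x => ?_))
      simp [h x]

theorem first_items (l : List Char) : ∀ (i : Int) (f0 : PySem.Dict String Int),
    ((PySem.List.enumerate l i).foldl (fun f ic =>
        if f.contains (pyChar ic.2) = false then f.insert (pyChar ic.2) ic.1 else f) f0).items
      = f0.items ++ foI i f0.keys (l.map pyChar) := by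
  induction l with
  | nil => intro i f0; simp [PySem.List.enumerate, foI]
  | cons c rest ih =>
    intro i f0
    rw [PySem.List.enumerate_cons, List.foldl_cons, List.map_cons]
    by_cases hc : f0.contains (pyChar c) = false
    · have hfo : foI i f0.keys (pyChar c :: rest.map pyChar)
          = (pyChar c, i) :: foI (i + 1) (pyChar c :: f0.keys) (rest.map pyChar) := by
        rw [foI.eq_2, if_neg (fun hm => by
          simp [(PySem.Dict.contains_iff_mem_keys f0 (pyChar c)).mpr hm] at hc)]
      rw [hfo, if_pos hc, ih (i + 1) (f0.insert (pyChar c) i),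
        PySem.Dict.items_insert_of_not_contains _ _ hc,
        PySem.Dict.keys_insert_of_not_contains _ _ hc,
        foI_congr _ _ (f0.keys ++ [pyChar c]) (pyChar c :: f0.keys) (fun x => by simp [or_comm]),
        List.append_assoc, List.singleton_append]
    · have hct : f0.contains (pyChar c) = true := by simpa using hc
      have hfo : foI i f0.keys (pyChar c :: rest.map pyChar)
          = foI (i + 1) f0.keys (rest.map pyChar) := by
        rw [foI.eq_2, if_pos ((PySem.Dict.contains_iff_mem_keys f0 (pyChar c)).mp hct)]
      rw [hfo, if_neg (by simp [hct]), ih (i + 1) f0]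

theorem set_update_ofList (s : PySem.Set String) (xs : List String) :
    PySem.Set.update s (PySem.Set.ofList xs) = PySem.Set.update s xs := by
  rw [PySem.Set.update_eq_append_filter, PySem.Set.update_eq_append_filter,
    PySem.Set.ofList_ofList]

theorem foI_fold (cs : List String) (l : List String) (k : Nat) (seen : List String)
    (g : PySem.Dict String (PySem.Set String)) (h : cs.drop k = l) :
    (foI (k : Int) seen l).foldl (fun g ci =>
        if ci.2 < (cs.length : Int) - 1 then
          g.insert ci.1 (PySem.Set.union (g.getD ci.1 PySem.Set.empty)
            (PySem.Set.ofList (cs.drop ((ci.2 + 1).toNat))))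
        else g) g
      = (fo seen l).foldl (fun g p => bulk g p.1 p.2) g := by
  induction l generalizing k seen g with
  | nil => rfl
  | cons c rest ih =>
    have hk : k < cs.length := by
      by_contra hh
      rw [List.drop_eq_nil_of_le (by omega)] at h
      exact List.cons_ne_nil c rest h.symm
    have hrest : cs.drop (k + 1) = rest := by
      rw [← List.drop_drop, h]
      rfl
    have hcast : (k : Int) + 1 = ((k + 1 : Nat) : Int) := by push_cast; ring
    by_cases hc : c ∈ seen
    · rw [foI.eq_2, if_pos hc, fo.eq_2, if_pos hc, hcast]
      exact ih _ seen g hrest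
    · rw [foI.eq_2, if_neg hc, fo.eq_2, if_neg hc]
      rw [List.foldl_cons, List.foldl_cons]
      have hstep : (if (k : Int) < (cs.length : Int) - 1 then
            g.insert c (PySem.Set.union (g.getD c PySem.Set.empty)
              (PySem.Set.ofList (cs.drop ((((k : Int)) + 1).toNat))))
          else g) = bulk g c rest := by
        have htn : (((k : Int)) + 1).toNat = k + 1 := by omega
        rw [htn, hrest]
        by_cases hlast : k + 1 < cs.length
        · rw [if_pos (by omega)]
          unfold bulk
          rw [if_neg (by
            intro hnil
            have := List.length_drop (l := cs) (i := k + 1)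
            rw [hrest, hnil] at this
            simp at this
            omega)]
          rw [PySem.Set.union, set_update_ofList]
        · have hnil : rest = [] := by
            rw [← hrest]
            exact List.drop_eq_nil_of_le (by omega)
          rw [if_neg (by omega), hnil]
          rfl
      rw [hstep, hcast]
      exact ih _ (c :: seen) (bulk g c rest) hrest

theorem foI_snd_nonneg (l : List String) : ∀ (i : Int) (seen : List String),
    ∀ p ∈ foI i seen l, i ≤ p.2 := by
  induction l with
  | nil => intro i seen p hp; simp [foI] at hp
  | cons c rest ih =>
    intro i seen p hp
    rw [foI.eq_2] at hp
    by_cases hc : c ∈ seen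
    · rw [if_pos hc] at hp
      have := ih (i + 1) seen p hp
      omega
    · rw [if_neg hc] at hp
      rcases List.mem_cons.mp hp with h | h
      · subst h; simp
      · have := ih (i + 1) (c :: seen) p h
        omega

theorem nodup_keys_foldl_stepA (ps : List (String × String)) :
    ∀ (g : PySem.Dict String (PySem.Set String)), g.keys.Nodup →
    (ps.foldl stepA g).keys.Nodup := by
  induction ps with
  | nil => intro g h; exact h
  | cons p ps ih =>
    intro g h
    rw [List.foldl_cons, stepA_eq]
    exact ih _ (PySem.Dict.nodup_keys_insert _ _ _ h)

-- A's inner loop equals B's inner loop, on any graph with unique keys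
theorem per_attempt (attempt : String) (g : PySem.Dict String (PySem.Set String))
    (hnd : g.keys.Nodup) :
    (connections attempt).foldl stepA g
      = (let first : PySem.Dict String Int :=
            (PySem.List.enumerate attempt.toList).foldl (fun f ic =>
              if f.contains (pyChar ic.2) = false then f.insert (pyChar ic.2) ic.1 else f)
              PySem.Dict.empty
          let n : Int := PySem.Str.len attempt
          first.items.foldl (fun graph ci =>
            if ci.2 < n - 1 then
              graph.insert ci.1 (PySem.Set.union (graph.getD ci.1 PySem.Set.empty)
                (PySem.Set.ofList ((PySem.Str.slice attempt (some (ci.2 + 1)) none).toList.map pyChar)))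
            else graph) g) := by
  rw [connections_eq, foldl_stepA_pairsOf,
    core_absorb (chars attempt) [] g hnd (by simp)]
  show _ = ((PySem.List.enumerate attempt.toList).foldl (fun f ic =>
      if f.contains (pyChar ic.2) = false then f.insert (pyChar ic.2) ic.1 else f)
      PySem.Dict.empty).items.foldl _ g
  rw [first_items attempt.toList 0 PySem.Dict.empty]
  show _ = (foI 0 [] (attempt.toList.map pyChar)).foldl _ g
  have hfun : (foI 0 [] (attempt.toList.map pyChar)).foldl (fun graph ci =>
        if ci.2 < PySem.Str.len attempt - 1 then
          graph.insert ci.1 (PySem.Set.union (graph.getD ci.1 PySem.Set.empty)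
            (PySem.Set.ofList ((PySem.Str.slice attempt (some (ci.2 + 1)) none).toList.map pyChar)))
        else graph) g
      = (foI 0 [] (attempt.toList.map pyChar)).foldl (fun graph ci =>
        if ci.2 < ((attempt.toList.map pyChar).length : Int) - 1 then
          graph.insert ci.1 (PySem.Set.union (graph.getD ci.1 PySem.Set.empty)
            (PySem.Set.ofList ((attempt.toList.map pyChar).drop ((ci.2 + 1).toNat))))
        else graph) g := by
    apply PySem.List.foldl_congr_mem
    intro acc x hx
    have hx2 : (0 : Int) ≤ x.2 := foI_snd_nonneg _ 0 [] x hx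
    rw [PySem.Str.toList_slice, PySem.Chars.slice_eq_listSlice,
      PySem.List.slice_from _ (by omega), List.map_drop,
      PySem.Str.len_eq]
    rw [List.length_map]
  rw [hfun]
  have hff := foI_fold (attempt.toList.map pyChar) (attempt.toList.map pyChar) 0 [] g rfl
  simp only [Nat.cast_zero] at hff
  rw [hff]
  rfl

-- ===== VERDICT (by name: the statement is the Claim_ definition above) =====
theorem make_number_graph_spec : Claim_equal_make_number_graph := by
  unfold Claim_equal_make_number_graph Spec_make_number_graph
  intro keylog _
  unfold make_number_graph make_number_graph_alt
  suffices h : ∀ (kl : List String) (g : PySem.Dict String (PySem.Set String)), g.keys.Nodup →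
      kl.foldl (fun graph attempt => (connections attempt).foldl stepA graph) g
        = kl.foldl (fun graph attempt =>
            let first : PySem.Dict String Int :=
              (PySem.List.enumerate attempt.toList).foldl (fun f ic =>
                if f.contains (pyChar ic.2) = false then f.insert (pyChar ic.2) ic.1 else f)
                PySem.Dict.empty
            let n : Int := PySem.Str.len attempt
            first.items.foldl (fun graph ci =>
              if ci.2 < n - 1 then
                graph.insert ci.1 (PySem.Set.union (graph.getD ci.1 PySem.Set.empty)
                  (PySem.Set.ofList ((PySem.Str.slice attempt (some (ci.2 + 1)) none).toList.map pyChar)))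
              else graph) graph) g by
    have hh := h keylog PySem.Dict.empty (by
      rw [PySem.Dict.keys_empty]; exact List.nodup_nil)
    exact congrArg PySem.Dict.items hh
  intro kl
  induction kl with
  | nil => intro g _; rfl
  | cons a rest ih =>
    intro g hnd
    rw [List.foldl_cons, List.foldl_cons, ← per_attempt a g hnd]
    exact ih _ (nodup_keys_foldl_stepA _ _ hnd)
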